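-- pv_equiv track=rewrite | github.com/janny801/algoStuff | h6/subsequenceprobs.py | longestoscsubseq
-- ===== SOURCE A (Python) =====
-- def longestoscsubseq(input_values):
--     n = len(input_values)
--     if n == 0:
--         return 0
--
--     # longest oscillating subsequence
--     up_end = [1] * n    # ends at i with last comparison "up"
--     down_end = [0] * n  # ends at i with last comparison "down"
--
--     for i in range(n):
--         for j in range(i):
--             if input_values[j] < input_values[i]:
--                 # either start the first "up" or continue after a "down"
--                 candidate = max(2, down_end[j] + 1)
--                 if candidate > up_end[i]:
--                     up_end[i] = candidate
--             elif input_values[j] > input_values[i] and up_end[j] >= 2: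
--                 # can only go "down" after already having an "up"
--                 candidate = up_end[j] + 1
--                 if candidate > down_end[i]:
--                     down_end[i] = candidate
--
--     longest_oscillating = 0
--     for i in range(n):
--         longest_oscillating = max(longest_oscillating, up_end[i], down_end[i])
--
--     return longest_oscillating
-- ===== SOURCE B (Python) =====
-- def longestoscsubseq(input_values):
--     if not input_values:
--         return 0
--     up, down = 1, 0
--     prev = input_values[0]
--     for x in input_values[1:]:
--         if x > prev:
--             up = max(up, 2, down + 1)
--         elif x < prev and up >= 2:
--             down = max(down, up + 1)
--         prev = x
--     return max(up, down)
-- ===== Notes on version B (the rewrite author's own statement) =====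
-- stated objective: faster
-- what changed: Replaced the O(n^2) pairwise up_end/down_end dynamic programme with a single left-to-right greedy scan that keeps only the best up-ending and down-ending subsequence lengths and the previous element.
import Mathlib
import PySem

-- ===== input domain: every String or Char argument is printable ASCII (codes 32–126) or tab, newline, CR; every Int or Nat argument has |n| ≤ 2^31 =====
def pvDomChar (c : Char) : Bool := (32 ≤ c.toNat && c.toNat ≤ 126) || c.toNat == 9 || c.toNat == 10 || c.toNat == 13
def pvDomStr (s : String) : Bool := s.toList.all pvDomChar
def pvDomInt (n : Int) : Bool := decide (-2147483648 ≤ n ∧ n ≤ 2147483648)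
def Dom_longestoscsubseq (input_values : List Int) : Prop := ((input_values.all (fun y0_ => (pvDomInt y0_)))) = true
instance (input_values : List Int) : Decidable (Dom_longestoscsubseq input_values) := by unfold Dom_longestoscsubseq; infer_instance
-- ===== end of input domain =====

-- B replaces A's O(n^2) pairwise dynamic programme by a single O(n) greedy scan that keeps
-- only the best up-ending / down-ending lengths and the previous element.

-- ===== PORT A =====
-- inner loop 'for j in range(i)': updates (up_end[i], down_end[i]) in place; here the pair is
-- the fold state and is appended afterwards (Python mutates a preallocated cell i, which only
-- position i ever reads — the computed arrays are identical).  Indices j < i are always in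
-- range, so 'input_values[j]' / 'up_end[j]' / 'down_end[j]' are ported exactly by getD _ 0.
def pvIStep (vals ups downs : List Int) (x : Int) (ud : Int × Int) (j : Nat) : Int × Int :=
  if vals.getD j 0 < x then
    (max ud.1 (max 2 (downs.getD j 0 + 1)), ud.2)
  else if x < vals.getD j 0 ∧ 2 ≤ ups.getD j 0 then
    (ud.1, max ud.2 (ups.getD j 0 + 1))
  else ud

def pvInnerA (vals ups downs : List Int) (x : Int) (i : Nat) : Int × Int :=
  (List.range i).foldl (pvIStep vals ups downs x) (1, 0)

-- outer loop 'for i in range(n)'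
def pvAStep (vals : List Int) (st : List Int × List Int) (i : Nat) : List Int × List Int :=
  let ud := pvInnerA vals st.1 st.2 (vals.getD i 0) i
  (st.1 ++ [ud.1], st.2 ++ [ud.2])

def longestoscsubseq (input_values : List Int) : Int :=
  if input_values.length = 0 then 0
  else
    let st := (List.range input_values.length).foldl (pvAStep input_values) ([], [])
    (List.range input_values.length).foldl
      (fun acc i => max acc (max (st.1.getD i 0) (st.2.getD i 0))) 0

-- ===== PORT B =====
-- state (up, down, prev)
def pvStepB (st : Int × Int × Int) (x : Int) : Int × Int × Int :=
  if st.2.2 < x then (max st.1 (max 2 (st.2.1 + 1)), st.2.1, x)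
  else if x < st.2.2 ∧ 2 ≤ st.1 then (st.1, max st.2.1 (st.1 + 1), x)
  else (st.1, st.2.1, x)

def longestoscsubseq_alt (input_values : List Int) : Int :=
  match input_values with
  | [] => 0
  | v :: rest =>
    let s := rest.foldl pvStepB (1, 0, v)
    max s.1 s.2.1

-- ===== PRECONDITION & SPEC =====
def Spec_longestoscsubseq (input_values : List Int) (out : Int) : Prop := out = longestoscsubseq_alt input_values
instance (input_values : List Int) (out : Int) : Decidable (Spec_longestoscsubseq input_values out) := by unfold Spec_longestoscsubseq; infer_instance

-- ===== CLAIM (what is proved, stated in full; the proofs are below) =====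
def Claim_equal_longestoscsubseq : Prop := ∀ (input_values : List Int), Dom_longestoscsubseq input_values → Spec_longestoscsubseq input_values (longestoscsubseq input_values)

-- ===== LEMMAS AND PROOFS =====

-- greedy state after the first k+1 elements of v :: rest
def pvG (v : Int) (rest : List Int) (k : Nat) : Int × Int × Int :=
  (rest.take k).foldl pvStepB (1, 0, v)

-- A's arrays after the first k rounds of the outer loop
def pvS (vals : List Int) (k : Nat) : List Int × List Int :=
  (List.range k).foldl (pvAStep vals) ([], [])

-- the loop invariant tying A's arrays to B's greedy state
def pvInv (v : Int) (rest : List Int) (k : Nat) : Prop :=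
  let g := pvG v rest k
  let s := pvS (v :: rest) (k + 1)
  let u := g.1; let d := g.2.1; let pr := g.2.2
  let ups := s.1; let downs := s.2
  let vl := v :: rest
  ups.length = k + 1 ∧
  downs.length = k + 1 ∧
  pr = vl.getD k 0 ∧
  (∀ i < k + 1, 1 ≤ ups.getD i 0 ∧ ups.getD i 0 ≤ u) ∧
  (∀ i < k + 1, 0 ≤ downs.getD i 0 ∧ downs.getD i 0 ≤ d) ∧
  (∃ i < k + 1, ups.getD i 0 = u) ∧
  (∃ i < k + 1, downs.getD i 0 = d ∧ vl.getD i 0 ≤ pr) ∧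
  (2 ≤ u → ∃ i < k + 1, ups.getD i 0 = u ∧ pr ≤ vl.getD i 0) ∧
  (3 ≤ u → u - 1 ≤ d) ∧
  (∀ j < k + 1, vl.getD j 0 < pr → max 2 (downs.getD j 0 + 1) ≤ ups.getD k 0) ∧
  (∀ j < k + 1, pr < vl.getD j 0 → 2 ≤ ups.getD j 0 → ups.getD j 0 + 1 ≤ downs.getD k 0) ∧
  d ≤ u + 1 ∧
  (u = 1 → d = 0)

-- monotonicity / bound lemmas for the inner fold
lemma pvIStep_fst_mono (vals ups downs : List Int) (x : Int) (ud : Int × Int) (j : Nat) :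
    ud.1 ≤ (pvIStep vals ups downs x ud j).1 := by
  unfold pvIStep; split_ifs <;> simp

lemma pvIStep_snd_mono (vals ups downs : List Int) (x : Int) (ud : Int × Int) (j : Nat) :
    ud.2 ≤ (pvIStep vals ups downs x ud j).2 := by
  unfold pvIStep; split_ifs <;> simp

lemma pvInner_fst_mono (vals ups downs : List Int) (x : Int) (l : List Nat) (ud : Int × Int) :
    ud.1 ≤ (l.foldl (pvIStep vals ups downs x) ud).1 := by
  induction l generalizing ud with
  | nil => simp
  | cons j t ih =>
      simp only [List.foldl_cons]
      exact le_trans (pvIStep_fst_mono vals ups downs x ud j) (ih _)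

lemma pvInner_snd_mono (vals ups downs : List Int) (x : Int) (l : List Nat) (ud : Int × Int) :
    ud.2 ≤ (l.foldl (pvIStep vals ups downs x) ud).2 := by
  induction l generalizing ud with
  | nil => simp
  | cons j t ih =>
      simp only [List.foldl_cons]
      exact le_trans (pvIStep_snd_mono vals ups downs x ud j) (ih _)

lemma pvInner_lower1 (vals ups downs : List Int) (x : Int) (l : List Nat) (ud : Int × Int)
    (j : Nat) (hj : j ∈ l) (hlt : vals.getD j 0 < x) :
    max 2 (downs.getD j 0 + 1) ≤ (l.foldl (pvIStep vals ups downs x) ud).1 := by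
  induction l generalizing ud with
  | nil => simp at hj
  | cons a t ih =>
      simp only [List.foldl_cons]
      rcases List.mem_cons.mp hj with h | h
      · subst h
        refine le_trans ?_ (pvInner_fst_mono vals ups downs x t _)
        unfold pvIStep
        rw [if_pos hlt]
        simp
      · exact ih _ h

lemma pvInner_lower2 (vals ups downs : List Int) (x : Int) (l : List Nat) (ud : Int × Int)
    (j : Nat) (hj : j ∈ l) (hlt : x < vals.getD j 0) (hu : 2 ≤ ups.getD j 0) :
    ups.getD j 0 + 1 ≤ (l.foldl (pvIStep vals ups downs x) ud).2 := by
  induction l generalizing ud with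
  | nil => simp at hj
  | cons a t ih =>
      simp only [List.foldl_cons]
      rcases List.mem_cons.mp hj with h | h
      · subst h
        refine le_trans ?_ (pvInner_snd_mono vals ups downs x t _)
        unfold pvIStep
        rw [if_neg (by omega), if_pos ⟨hlt, hu⟩]
        simp
      · exact ih _ h

lemma pvInner_upper1 (vals ups downs : List Int) (x : Int) (l : List Nat) (ud : Int × Int)
    (B : Int) (h0 : ud.1 ≤ B)
    (hB : ∀ j ∈ l, vals.getD j 0 < x → max 2 (downs.getD j 0 + 1) ≤ B) :
    (l.foldl (pvIStep vals ups downs x) ud).1 ≤ B := by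
  induction l generalizing ud with
  | nil => simpa using h0
  | cons a t ih =>
      simp only [List.foldl_cons]
      refine ih _ ?_ (fun j hj => hB j (List.mem_cons_of_mem _ hj))
      unfold pvIStep
      split_ifs with h1 h2
      · have := hB a (List.mem_cons_self ..) h1
        simp only [max_le_iff] at this ⊢
        exact ⟨h0, this⟩
      · exact h0
      · exact h0

lemma pvInner_upper2 (vals ups downs : List Int) (x : Int) (l : List Nat) (ud : Int × Int)
    (B : Int) (h0 : ud.2 ≤ B)
    (hB : ∀ j ∈ l, x < vals.getD j 0 → 2 ≤ ups.getD j 0 → ups.getD j 0 + 1 ≤ B) :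
    (l.foldl (pvIStep vals ups downs x) ud).2 ≤ B := by
  induction l generalizing ud with
  | nil => simpa using h0
  | cons a t ih =>
      simp only [List.foldl_cons]
      refine ih _ ?_ (fun j hj => hB j (List.mem_cons_of_mem _ hj))
      unfold pvIStep
      split_ifs with h1 h2
      · exact h0
      · simpa using ⟨h0, hB a (List.mem_cons_self ..) h2.1 h2.2⟩
      · exact h0

-- final max-fold lemmas
lemma pvFMax_init_le (g : Nat → Int) (l : List Nat) (init : Int) :
    init ≤ l.foldl (fun acc i => max acc (g i)) init := by
  induction l generalizing init with
  | nil => simp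
  | cons a t ih => exact le_trans (le_max_left _ _) (ih _)

lemma pvFMax_mem_le (g : Nat → Int) (l : List Nat) (init : Int) (j : Nat) (hj : j ∈ l) :
    g j ≤ l.foldl (fun acc i => max acc (g i)) init := by
  induction l generalizing init with
  | nil => simp at hj
  | cons a t ih =>
      rcases List.mem_cons.mp hj with h | h
      · subst h
        exact le_trans (le_max_right _ _) (pvFMax_init_le g t _)
      · exact ih _ h

lemma pvFMax_le (g : Nat → Int) (l : List Nat) (init B : Int) (h0 : init ≤ B)
    (hB : ∀ j ∈ l, g j ≤ B) :
    l.foldl (fun acc i => max acc (g i)) init ≤ B := by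
  induction l generalizing init with
  | nil => simpa using h0
  | cons a t ih =>
      simp only [List.foldl_cons]
      exact ih _ (max_le h0 (hB a (List.mem_cons_self ..)))
        (fun j hj => hB j (List.mem_cons_of_mem _ hj))

lemma pvGetD_snoc_lt (l : List Int) (a : Int) (i : Nat) (h : i < l.length) :
    (l ++ [a]).getD i 0 = l.getD i 0 := List.getD_append l [a] 0 i h

lemma pvGetD_snoc_eq (l : List Int) (a : Int) : (l ++ [a]).getD l.length 0 = a := by simp

lemma pvG_succ (v : Int) (rest : List Int) (k : Nat) (hk : k < rest.length) :
    pvG v rest (k+1) = pvStepB (pvG v rest k) (rest.getD k 0) := by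
  unfold pvG
  rw [List.getD_eq_getElem _ _ hk, List.take_succ_eq_append_getElem hk, List.foldl_append]
  simp

lemma pvS_succ (vals : List Int) (k : Nat) :
    pvS vals (k+1) = pvAStep vals (pvS vals k) k := by
  unfold pvS; rw [List.range_succ, List.foldl_append]; simp

-- the main induction
lemma pvInv_holds (v : Int) (rest : List Int) (k : Nat) (hk : k ≤ rest.length) :
    pvInv v rest k := by
  induction k with
  | zero =>
      unfold pvInv pvG pvS
      simp [pvAStep, pvInnerA]
  | succ k ih =>
      have hklt : k < rest.length := by omega
      have ih' := ih (by omega)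
      unfold pvInv at ih'
      rcases hG : pvG v rest k with ⟨u, d, pr⟩
      rcases hS : pvS (v :: rest) (k+1) with ⟨ups, downs⟩
      rw [hG, hS] at ih'
      dsimp only at ih'
      obtain ⟨h1, h2, h3, h4, h5, ⟨iu, hiu, hiu'⟩, ⟨idx, hidx, hidx1, hidx2⟩,
        h8, h9, h10, h11, h12, h13⟩ := ih'
      set x := rest.getD k 0 with hxdef
      have hx1 : (v :: rest).getD (k+1) 0 = x := by simp [hxdef]
      have hu1 : 1 ≤ u := by have := (h4 iu hiu).1; omega
      have hd0 : 0 ≤ d := by have := (h5 idx hidx).1; omega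
      -- the new DP entries
      set U := (pvInnerA (v :: rest) ups downs x (k+1)).1 with hUdef
      set D := (pvInnerA (v :: rest) ups downs x (k+1)).2 with hDdef
      have hSnew : pvS (v :: rest) (k+2) = (ups ++ [U], downs ++ [D]) := by
        rw [pvS_succ, hS]
        unfold pvAStep
        rw [hx1]
      have hGnew : pvG v rest (k+1) = pvStepB (u, d, pr) x := by
        rw [pvG_succ v rest k hklt, hG]
      have hU1 : (1:Int) ≤ U := pvInner_fst_mono (v::rest) ups downs x _ (1,0)
      have hD0 : (0:Int) ≤ D := pvInner_snd_mono (v::rest) ups downs x _ (1,0)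
      have hUlow : ∀ j, j < k+1 → (v::rest).getD j 0 < x →
          max 2 (downs.getD j 0 + 1) ≤ U :=
        fun j hj hlt => pvInner_lower1 (v::rest) ups downs x _ (1,0) j
          (List.mem_range.mpr hj) hlt
      have hDlow : ∀ j, j < k+1 → x < (v::rest).getD j 0 → 2 ≤ ups.getD j 0 →
          ups.getD j 0 + 1 ≤ D :=
        fun j hj hlt hup => pvInner_lower2 (v::rest) ups downs x _ (1,0) j
          (List.mem_range.mpr hj) hlt hup
      have hUup : ∀ B : Int, 1 ≤ B →
          (∀ j, j < k+1 → (v::rest).getD j 0 < x → max 2 (downs.getD j 0 + 1) ≤ B) →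
          U ≤ B :=
        fun B hB1 hB => pvInner_upper1 (v::rest) ups downs x _ (1,0) B hB1
          (fun j hj => hB j (List.mem_range.mp hj))
      have hDup : ∀ B : Int, 0 ≤ B →
          (∀ j, j < k+1 → x < (v::rest).getD j 0 → 2 ≤ ups.getD j 0 → ups.getD j 0 + 1 ≤ B) →
          D ≤ B :=
        fun B hB0 hB => pvInner_upper2 (v::rest) ups downs x _ (1,0) B hB0
          (fun j hj => hB j (List.mem_range.mp hj))
      have hupsl : ∀ i, i < k+1 → (ups ++ [U]).getD i 0 = ups.getD i 0 :=
        fun i h => pvGetD_snoc_lt _ _ _ (by omega)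
      have hdownsl : ∀ i, i < k+1 → (downs ++ [D]).getD i 0 = downs.getD i 0 :=
        fun i h => pvGetD_snoc_lt _ _ _ (by omega)
      have hupse : (ups ++ [U]).getD (k+1) 0 = U := by
        rw [← h1]; exact pvGetD_snoc_eq _ _
      have hdownse : (downs ++ [D]).getD (k+1) 0 = D := by
        rw [← h2]; exact pvGetD_snoc_eq _ _
      unfold pvInv
      rw [hGnew, hSnew]
      rcases lt_trichotomy pr x with hc | hc | hc
      · -- up move: x > prev
        have hstep : pvStepB (u, d, pr) x = (max u (max 2 (d+1)), d, x) := by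
          simp [pvStepB, hc]
        have hUeq : U = max 2 (d + 1) := by
          apply le_antisymm
          · exact hUup _ (by omega) (fun j hj hlt => by
              have := (h5 j hj).2; omega)
          · exact le_trans (by omega) (hUlow idx hidx (by omega))
        have hule : u ≤ max 2 (d + 1) := by
          by_cases h3u : 3 ≤ u
          · have := h9 h3u; omega
          · omega
        have hu'eq : max u (max 2 (d+1)) = U := by rw [hUeq]; omega
        have hDled : D ≤ d := by
          apply hDup _ hd0
          intro j hj hlt hup
          have := h11 j hj (by omega) hup
          have := (h5 k (by omega)).2
          omega
        rw [hstep]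
        dsimp only
        refine ⟨by simp [h1], by simp [h2], hx1.symm, ?_, ?_, ?_, ?_, ?_, ?_, ?_, ?_, ?_, ?_⟩
        · intro i hi
          rcases Nat.lt_or_ge i (k+1) with h | h
          · rw [hupsl i h]
            have := h4 i h; omega
          · have hieq : i = k+1 := by omega
            subst hieq; rw [hupse]; omega
        · intro i hi
          rcases Nat.lt_or_ge i (k+1) with h | h
          · rw [hdownsl i h]; exact h5 i h
          · have hieq : i = k+1 := by omega
            subst hieq; rw [hdownse]; exact ⟨hD0, hDled⟩
        · exact ⟨k+1, by omega, by rw [hupse]; omega⟩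
        · exact ⟨idx, by omega, by rw [hdownsl idx hidx]; exact hidx1, by omega⟩
        · intro _
          exact ⟨k+1, by omega, by rw [hupse]; omega, le_of_eq hx1.symm⟩
        · omega
        · intro j hj hlt
          rw [hupse]
          rcases Nat.lt_or_ge j (k+1) with h | h
          · rw [hdownsl j h]
            have := hUlow j h hlt
            omega
          · have hjeq : j = k+1 := by omega
            subst hjeq
            rw [hx1] at hlt; omega
        · intro j hj hlt hup
          rw [hdownse]
          rcases Nat.lt_or_ge j (k+1) with h | h
          · rw [hupsl j h] at hup ⊢
            exact hDlow j h hlt hup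
          · have hjeq : j = k+1 := by omega
            subst hjeq
            rw [hx1] at hlt; omega
        · omega
        · omega
      · -- equal element: state unchanged
        have hstep : pvStepB (u, d, pr) x = (u, d, x) := by
          unfold pvStepB
          dsimp only
          rw [if_neg (by omega), if_neg (by omega)]
        have hUle : U ≤ u := by
          apply hUup u hu1
          intro j hj hlt
          have h10' := h10 j hj (by omega)
          have := (h4 k (by omega)).2
          omega
        have hDle : D ≤ d := by
          apply hDup d hd0
          intro j hj hlt hup
          have h11' := h11 j hj (by omega) hup
          have := (h5 k (by omega)).2
          omega
        rw [hstep]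
        dsimp only
        refine ⟨by simp [h1], by simp [h2], hx1.symm, ?_, ?_, ?_, ?_, ?_, h9, ?_, ?_, h12, h13⟩
        · intro i hi
          rcases Nat.lt_or_ge i (k+1) with h | h
          · rw [hupsl i h]; exact h4 i h
          · have hieq : i = k+1 := by omega
            subst hieq; rw [hupse]; exact ⟨hU1, hUle⟩
        · intro i hi
          rcases Nat.lt_or_ge i (k+1) with h | h
          · rw [hdownsl i h]; exact h5 i h
          · have hieq : i = k+1 := by omega
            subst hieq; rw [hdownse]; exact ⟨hD0, hDle⟩
        · exact ⟨iu, by omega, by rw [hupsl iu hiu]; exact hiu'⟩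
        · exact ⟨idx, by omega, by rw [hdownsl idx hidx]; exact hidx1, by omega⟩
        · intro h2u
          obtain ⟨i, hi, hi1, hi2⟩ := h8 h2u
          exact ⟨i, by omega, by rw [hupsl i hi]; exact hi1, by omega⟩
        · intro j hj hlt
          rw [hupse]
          rcases Nat.lt_or_ge j (k+1) with h | h
          · rw [hdownsl j h]
            exact hUlow j h hlt
          · have hjeq : j = k+1 := by omega
            subst hjeq
            rw [hx1] at hlt; omega
        · intro j hj hlt hup
          rw [hdownse]
          rcases Nat.lt_or_ge j (k+1) with h | h
          · rw [hupsl j h] at hup ⊢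
            exact hDlow j h hlt hup
          · have hjeq : j = k+1 := by omega
            subst hjeq
            rw [hx1] at hlt; omega
      · -- down move: x < prev
        have hUle : U ≤ u := by
          apply hUup u hu1
          intro j hj hlt
          have h10' := h10 j hj (by omega)
          have := (h4 k (by omega)).2
          omega
        by_cases h2u : 2 ≤ u
        · have hstep : pvStepB (u, d, pr) x = (u, max d (u+1), x) := by
            unfold pvStepB
            dsimp only
            rw [if_neg (by omega), if_pos ⟨hc, h2u⟩]
          have hDeq : D = u + 1 := by
            apply le_antisymm
            · apply hDup (u+1) (by omega)
              intro j hj hlt hup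
              have := (h4 j hj).2
              omega
            · obtain ⟨i, hi, hi1, hi2⟩ := h8 h2u
              have := hDlow i hi (by omega) (by omega)
              omega
          rw [hstep]
          dsimp only
          refine ⟨by simp [h1], by simp [h2], hx1.symm, ?_, ?_, ?_, ?_, ?_, ?_, ?_, ?_, by omega, by omega⟩
          · intro i hi
            rcases Nat.lt_or_ge i (k+1) with h | h
            · rw [hupsl i h]; exact h4 i h
            · have hieq : i = k+1 := by omega
              subst hieq; rw [hupse]; exact ⟨hU1, hUle⟩
          · intro i hi
            rcases Nat.lt_or_ge i (k+1) with h | h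
            · rw [hdownsl i h]
              have := h5 i h; omega
            · have hieq : i = k+1 := by omega
              subst hieq; rw [hdownse]; omega
          · exact ⟨iu, by omega, by rw [hupsl iu hiu]; exact hiu'⟩
          · exact ⟨k+1, by omega, by rw [hdownse]; omega, le_of_eq hx1.symm⟩
          · intro _
            obtain ⟨i, hi, hi1, hi2⟩ := h8 h2u
            exact ⟨i, by omega, by rw [hupsl i hi]; exact hi1, by omega⟩
          · intro _; omega
          · intro j hj hlt
            rw [hupse]
            rcases Nat.lt_or_ge j (k+1) with h | h
            · rw [hdownsl j h]
              exact hUlow j h hlt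
            · have hjeq : j = k+1 := by omega
              subst hjeq
              rw [hx1] at hlt; omega
          · intro j hj hlt hup
            rw [hdownse]
            rcases Nat.lt_or_ge j (k+1) with h | h
            · rw [hupsl j h] at hup ⊢
              exact hDlow j h hlt hup
            · have hjeq : j = k+1 := by omega
              subst hjeq
              rw [hx1] at hlt; omega
        · have hu1e : u = 1 := by omega
          have hd0e : d = 0 := h13 hu1e
          have hstep : pvStepB (u, d, pr) x = (u, d, x) := by
            unfold pvStepB
            dsimp only
            rw [if_neg (by omega), if_neg (by omega)]
          have hDle : D ≤ 0 := by
            apply hDup 0 le_rfl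
            intro j hj hlt hup
            have := (h4 j hj).2
            omega
          rw [hstep]
          dsimp only
          refine ⟨by simp [h1], by simp [h2], hx1.symm, ?_, ?_, ?_, ?_, ?_, h9, ?_, ?_, h12, h13⟩
          · intro i hi
            rcases Nat.lt_or_ge i (k+1) with h | h
            · rw [hupsl i h]; exact h4 i h
            · have hieq : i = k+1 := by omega
              subst hieq; rw [hupse]; exact ⟨hU1, by omega⟩
          · intro i hi
            rcases Nat.lt_or_ge i (k+1) with h | h
            · rw [hdownsl i h]; exact h5 i h
            · have hieq : i = k+1 := by omega
              subst hieq; rw [hdownse]; omega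
          · exact ⟨iu, by omega, by rw [hupsl iu hiu]; exact hiu'⟩
          · exact ⟨k+1, by omega, by rw [hdownse]; omega, le_of_eq hx1.symm⟩
          · intro h2u'; omega
          · intro j hj hlt
            rw [hupse]
            rcases Nat.lt_or_ge j (k+1) with h | h
            · rw [hdownsl j h]
              exact hUlow j h hlt
            · have hjeq : j = k+1 := by omega
              subst hjeq
              rw [hx1] at hlt; omega
          · intro j hj hlt hup
            rw [hdownse]
            rcases Nat.lt_or_ge j (k+1) with h | h
            · rw [hupsl j h] at hup ⊢
              exact hDlow j h hlt hup
            · have hjeq : j = k+1 := by omega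
              subst hjeq
              rw [hx1] at hlt; omega

-- ===== VERDICT (by name: the statement is the Claim_ definition above) =====
theorem longestoscsubseq_spec : Claim_equal_longestoscsubseq := by
  intro input_values _hdom
  unfold Spec_longestoscsubseq
  cases input_values with
  | nil => rfl
  | cons v rest =>
    have hinv := pvInv_holds v rest rest.length le_rfl
    unfold pvInv at hinv
    rcases hG : pvG v rest rest.length with ⟨u, d, pr⟩
    rcases hS : pvS (v :: rest) (rest.length + 1) with ⟨ups, downs⟩
    rw [hG, hS] at hinv
    dsimp only at hinv
    obtain ⟨h1, h2, h3, h4, h5, ⟨iu, hiu, hiu'⟩, ⟨idx, hidx, hidx1, hidx2⟩,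
      _, _, _, _, _, _⟩ := hinv
    have hu1 : 1 ≤ u := by have := (h4 iu hiu).1; omega
    have hfold : rest.foldl pvStepB (1, 0, v) = (u, d, pr) := by
      rw [← hG]; unfold pvG; rw [List.take_length]
    have hB : longestoscsubseq_alt (v :: rest) = max u d := by
      show max (rest.foldl pvStepB (1, 0, v)).1 (rest.foldl pvStepB (1, 0, v)).2.1 = max u d
      rw [hfold]
    have hst : (List.range ((v :: rest).length)).foldl (pvAStep (v :: rest)) ([], []) = (ups, downs) := by
      rw [← hS]; simp [pvS]
    have hA : longestoscsubseq (v :: rest) = max u d := by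
      unfold longestoscsubseq
      rw [if_neg (by simp)]
      dsimp only
      rw [hst]
      dsimp only
      simp only [List.length_cons]
      apply le_antisymm
      · apply pvFMax_le
        · omega
        · intro j hj
          have hj' := List.mem_range.mp hj
          have := h4 j hj'
          have := h5 j hj'
          omega
      · apply max_le
        · have := pvFMax_mem_le (fun i => max (ups.getD i 0) (downs.getD i 0))
            (List.range (rest.length + 1)) 0 iu (List.mem_range.mpr hiu)
          simp only at this
          omega
        · have := pvFMax_mem_le (fun i => max (ups.getD i 0) (downs.getD i 0))
            (List.range (rest.length + 1)) 0 idx (List.mem_range.mpr hidx)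
          simp only at this
          omega
    rw [hA, hB]
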